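-- pv_equiv track=rewrite | github.com/thran/the_code | adventOfCode/2018/5/5.py | iterate_mask
-- ===== SOURCE A (Python) =====
-- def iterate_mask(mask):
--     this = None
--     for i, m in enumerate(mask):
--         if m == 1:
--             last = this
--             this = i
--             if last is not None:
--                 yield last, this
-- ===== SOURCE B (Python) =====
-- def iterate_mask(mask):
--     idx = [i for i, m in enumerate(mask) if m == 1]
--     yield from zip(idx, idx[1:])
-- ===== Notes on version B (the rewrite author's own statement) =====
-- stated objective: simpler
-- what changed: B first collects all indices where mask==1 into a list and then yields adjacent pairs via zip(idx, idx[1:]), replacing A's single pass with rolling last/this scalars.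
import Mathlib
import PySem

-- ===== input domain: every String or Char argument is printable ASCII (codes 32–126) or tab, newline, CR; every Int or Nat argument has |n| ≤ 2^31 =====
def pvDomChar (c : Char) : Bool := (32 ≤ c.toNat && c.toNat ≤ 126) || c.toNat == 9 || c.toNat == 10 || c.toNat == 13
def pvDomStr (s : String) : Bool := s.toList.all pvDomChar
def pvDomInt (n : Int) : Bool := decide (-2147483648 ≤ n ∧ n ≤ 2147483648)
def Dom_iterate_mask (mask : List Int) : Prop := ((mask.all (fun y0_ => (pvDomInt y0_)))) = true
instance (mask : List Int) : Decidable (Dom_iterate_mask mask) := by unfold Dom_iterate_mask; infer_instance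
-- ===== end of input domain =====

-- B collects the indices where mask==1 first and pairs them with zip(idx, idx[1:]) — a simpler decomposition, same output.
-- ===== PORT A =====
-- the 'for i, m in enumerate(mask)' loop with rolling state 'this', yielding (last, this) pairs
def pvAGo (xs : List (Int × Int)) (this : Option Int) : List (Int × Int) :=
  match xs with
  | [] => []
  | (i, m) :: rest =>
    if m = 1 then
      (match this with
       | some last => [(last, i)]
       | none => []) ++ pvAGo rest (some i)
    else pvAGo rest this

def iterate_mask (mask : List Int) : List (Int × Int) :=
  pvAGo (PySem.List.enumerate mask) none

-- ===== PORT B =====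
-- idx = [i for i, m in enumerate(mask) if m == 1]
def pvIdx (mask : List Int) : List Int :=
  (PySem.List.enumerate mask).filterMap (fun p => if p.2 = 1 then some p.1 else none)

-- yield from zip(idx, idx[1:])
def iterate_mask_alt (mask : List Int) : List (Int × Int) :=
  (pvIdx mask).zip (pvIdx mask).tail

-- ===== PRECONDITION & SPEC =====
def Spec_iterate_mask (mask : List Int) (out : List (Int × Int)) : Prop := out = iterate_mask_alt mask
instance (mask : List Int) (out : List (Int × Int)) : Decidable (Spec_iterate_mask mask out) := by unfold Spec_iterate_mask; infer_instance

-- ===== CLAIM (what is proved, stated in full; the proofs are below) =====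
def Claim_equal_iterate_mask : Prop := ∀ (mask : List Int), Dom_iterate_mask mask → Spec_iterate_mask mask (iterate_mask mask)

-- ===== LEMMAS AND PROOFS =====

-- ===== VERDICT (by name: the statement is the Claim_ definition above) =====
-- invariant: the loop with state 'this' produces the pairwise zip of (this's value, if any) followed by the remaining 1-indices
theorem pvAGo_eq (xs : List (Int × Int)) : ∀ (o : Option Int),
    pvAGo xs o =
      (o.toList ++ xs.filterMap (fun p => if p.2 = 1 then some p.1 else none)).zip
      (o.toList ++ xs.filterMap (fun p => if p.2 = 1 then some p.1 else none)).tail := by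
  induction xs with
  | nil => intro o; cases o <;> simp [pvAGo]
  | cons hd tl ih =>
    intro o
    obtain ⟨i, m⟩ := hd
    by_cases hm : m = 1
    · cases o with
      | none => simp [pvAGo, hm, ih (some i)]
      | some t =>
        have h := ih (some i)
        simp [pvAGo, hm] at h ⊢
        rw [h]
    · cases o <;> simp [pvAGo, hm, ih]

theorem iterate_mask_spec : Claim_equal_iterate_mask := by
  intro mask _
  unfold Spec_iterate_mask iterate_mask iterate_mask_alt pvIdx
  rw [pvAGo_eq]
  simp
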